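-- pv_equiv track=rewrite | github.com/AyushAgnihotri2025/CP-Solutions | GeeksforGeeks/Python3/Easy/Powerfull Integer/powerfull-integer.py | powerfullInteger
-- ===== SOURCE A (Python) =====
-- from typing import List
--
-- def powerfullInteger(n : int, intervals : List[List[int]], k : int) -> int:
--     # code here
--     ints = []
--     for start, end in intervals:
--         ints.extend([(start, -1), (end, 1)])
--     ints.sort()
--
--     n, ans = 0, -1
--     for time, typ in ints:
--         if typ == -1:
--             n += 1
--         else:
--             if n >= k:
--                 ans = max(ans, time)
--             n -= 1
--     return ans
-- ===== SOURCE B (Python) =====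
-- from bisect import bisect_left, bisect_right
-- from typing import List
--
-- def powerfullInteger(n: int, intervals: List[List[int]], k: int) -> int:
--     # sort-then-binary-search: coverage at a point e (inclusive endpoints)
--     # is #starts <= e minus #ends < e; answer is the largest end with coverage >= k
--     starts = sorted(s for s, e in intervals)
--     ends = sorted(e for s, e in intervals)
--     ans = -1
--     for e in ends:
--         if bisect_right(starts, e) - bisect_left(ends, e) >= k:
--             ans = max(ans, e)
--     return ans
-- ===== Notes on version B (the rewrite author's own statement) =====
-- stated objective: alternative
-- what changed: replaces the merged-event running-counter sweep with two independently sorted endpoint lists and a bisect-based coverage count (#starts <= e minus #ends < e) evaluated at each end coordinate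
import Mathlib
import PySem

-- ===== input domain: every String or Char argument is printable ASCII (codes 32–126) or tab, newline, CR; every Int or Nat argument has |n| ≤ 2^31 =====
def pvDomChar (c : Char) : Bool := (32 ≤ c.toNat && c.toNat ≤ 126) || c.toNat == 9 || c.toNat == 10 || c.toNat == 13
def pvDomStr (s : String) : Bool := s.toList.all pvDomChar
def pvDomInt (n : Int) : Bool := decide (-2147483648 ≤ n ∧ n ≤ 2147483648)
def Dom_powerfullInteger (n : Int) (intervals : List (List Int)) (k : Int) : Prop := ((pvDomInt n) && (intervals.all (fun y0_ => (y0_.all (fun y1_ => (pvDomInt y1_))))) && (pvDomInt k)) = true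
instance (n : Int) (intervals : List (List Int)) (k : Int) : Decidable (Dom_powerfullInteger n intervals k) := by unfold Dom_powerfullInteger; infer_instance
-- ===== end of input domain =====

-- B replaces A's merged-event running-counter sweep by two sorted endpoint lists with a
-- bisect-based coverage count at each end coordinate (alternative algorithm, same cost).

-- ===== PORT A =====
-- 'for start, end in intervals' unpacks rows of length exactly 2 (Pre_); row access is pyGetD iv 0/1.
def powerfullInteger (n : Int) (intervals : List (List Int)) (k : Int) : Int :=
  let ints : List (Int × Int) := intervals.foldl
    (fun acc iv => acc ++ [(PySem.List.pyGetD iv 0 0, (-1 : Int)), (PySem.List.pyGetD iv 1 0, (1 : Int))]) []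
  let ints2 := PySem.List.sorted2 ints (fun p => p.1) (fun p => p.2)
  let st := ints2.foldl
    (fun (st : Int × Int) tv =>
      if tv.2 == -1 then (st.1 + 1, st.2)
      else (st.1 - 1, if st.1 ≥ k then max st.2 tv.1 else st.2)) ((0 : Int), (-1 : Int))
  st.2

-- ===== PORT B =====
def powerfullInteger_alt (n : Int) (intervals : List (List Int)) (k : Int) : Int :=
  let starts := PySem.List.sorted (intervals.map (fun iv => PySem.List.pyGetD iv 0 0)) (fun x => x)
  let ends := PySem.List.sorted (intervals.map (fun iv => PySem.List.pyGetD iv 1 0)) (fun x => x)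
  ends.foldl
    (fun ans e =>
      if ((PySem.List.bisectRight starts e : Int) - (PySem.List.bisectLeft ends e : Int)) ≥ k
      then max ans e else ans) (-1)

-- ===== PRECONDITION & SPEC =====
-- Pre_ excludes exactly the inputs where Python A raises: 'for start, end in intervals'
-- raises ValueError unless every row has exactly two entries.
def Pre_powerfullInteger (n : Int) (intervals : List (List Int)) (k : Int) : Prop :=
  ∀ iv ∈ intervals, iv.length = 2
instance (n : Int) (intervals : List (List Int)) (k : Int) : Decidable (Pre_powerfullInteger n intervals k) := by unfold Pre_powerfullInteger; infer_instance

def pvWitness_powerfullInteger : Int × List (List Int) × Int := (0, [[0, 2], [1, 3]], 2)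

def Spec_powerfullInteger (n : Int) (intervals : List (List Int)) (k : Int) (out : Int) : Prop := out = powerfullInteger_alt n intervals k
instance (n : Int) (intervals : List (List Int)) (k : Int) (out : Int) : Decidable (Spec_powerfullInteger n intervals k out) := by unfold Spec_powerfullInteger; infer_instance

-- ===== CLAIM (what is proved, stated in full; the proofs are below) =====
def Claim_equal_powerfullInteger : Prop := ∀ (n : Int) (intervals : List (List Int)) (k : Int), Dom_powerfullInteger n intervals k → Pre_powerfullInteger n intervals k → Spec_powerfullInteger n intervals k (powerfullInteger n intervals k)

-- ===== LEMMAS AND PROOFS =====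

-- Python's lexicographic tuple order on (time, type) events.
def pvLexLe (a b : Int × Int) : Prop := a.1 < b.1 ∨ (a.1 = b.1 ∧ a.2 ≤ b.2)

def pvBefore (a b : Int × Int) : Bool :=
  decide (a.1 < b.1) || (!decide (b.1 < a.1) && decide (a.2 < b.2))

lemma pvBefore_false_iff (a b : Int × Int) : pvBefore b a = false ↔ pvLexLe a b := by
  simp [pvBefore, pvLexLe]; omega

lemma pv_insertBy_pairwise {α : Type} (before : α → α → Bool)
    (hasym : ∀ a b, before a b = true → before b a = false)
    (htrans : ∀ a b c, before b a = false → before c b = false → before c a = false)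
    (x : α) (ys : List α) (h : ys.Pairwise (fun a b => before b a = false)) :
    (PySem.List.insertBy before x ys).Pairwise (fun a b => before b a = false) := by
  induction ys with
  | nil => simp [PySem.List.insertBy]
  | cons y ys ih =>
    rcases List.pairwise_cons.1 h with ⟨hy, hys⟩
    by_cases hb : before x y = true
    · simp only [PySem.List.insertBy, hb, if_true]
      refine List.Pairwise.cons ?_ (List.Pairwise.cons hy hys)
      intro z hz
      rcases List.mem_cons.1 hz with rfl | hz
      · exact hasym _ _ hb
      · exact htrans x y z (hasym _ _ hb) (hy z hz)
    · have hb' : before x y = false := Bool.eq_false_iff.2 hb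
      simp only [PySem.List.insertBy, hb', Bool.false_eq_true, if_false]
      refine List.Pairwise.cons ?_ (ih hys)
      intro z hz
      rcases (PySem.List.mem_insertBy before x z ys).1 hz with rfl | hz
      · exact hb'
      · exact hy z hz

lemma pv_foldl_insertBy_pairwise {α : Type} (before : α → α → Bool)
    (hasym : ∀ a b, before a b = true → before b a = false)
    (htrans : ∀ a b c, before b a = false → before c b = false → before c a = false)
    (xs : List α) :
    (xs.foldl (fun acc x => PySem.List.insertBy before x acc) []).Pairwise
      (fun a b => before b a = false) := by
  suffices hgen : ∀ (acc : List α), acc.Pairwise (fun a b => before b a = false) →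
      (xs.foldl (fun acc x => PySem.List.insertBy before x acc) acc).Pairwise
        (fun a b => before b a = false) from hgen [] List.Pairwise.nil
  induction xs with
  | nil => intro acc hacc; simpa using hacc
  | cons x xs ih =>
    intro acc hacc
    exact ih _ (pv_insertBy_pairwise before hasym htrans x acc hacc)

lemma pv_sorted2_eq_foldl (xs : List (Int × Int)) :
    PySem.List.sorted2 xs (fun p => p.1) (fun p => p.2) =
      xs.foldl (fun acc x => PySem.List.insertBy pvBefore x acc) [] := rfl

lemma pv_sorted2_pairwise (xs : List (Int × Int)) :
    (PySem.List.sorted2 xs (fun p => p.1) (fun p => p.2)).Pairwise pvLexLe := by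
  rw [pv_sorted2_eq_foldl]
  have h := pv_foldl_insertBy_pairwise pvBefore
    (by intro a b hab; rcases a with ⟨a1, a2⟩; rcases b with ⟨b1, b2⟩
        simp [pvBefore] at hab ⊢; omega)
    (by intro a b c hba hcb; rcases a with ⟨a1, a2⟩; rcases b with ⟨b1, b2⟩; rcases c with ⟨c1, c2⟩
        simp [pvBefore] at hba hcb ⊢; omega)
    xs
  exact h.imp (fun hab => (pvBefore_false_iff _ _).1 hab)

-- A's sweep loop, with the running counter c and accumulator a made explicit.
def pvSweep (k c a : Int) : List (Int × Int) → Int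
  | [] => a
  | tv :: r =>
      if tv.2 == -1 then pvSweep k (c + 1) a r
      else pvSweep k (c - 1) (if c ≥ k then max a tv.1 else a) r

-- The end coordinates at which A's sweep takes a max.
def pvQual (k c : Int) : List (Int × Int) → List Int
  | [] => []
  | tv :: r =>
      if tv.2 == -1 then pvQual k (c + 1) r
      else (if c ≥ k then [tv.1] else []) ++ pvQual k (c - 1) r

-- Coverage of point e by an event list: #starts ≤ e minus #ends < e.
def pvCov (e : Int) (L : List (Int × Int)) : Int :=
  ((L.countP (fun p => p.2 == -1 && decide (p.1 ≤ e)) : Int)) -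
  ((L.countP (fun p => (!(p.2 == -1)) && decide (p.1 < e)) : Int))

lemma pv_foldl_eq_sweep (k : Int) (L : List (Int × Int)) (c a : Int) :
    (L.foldl
      (fun (st : Int × Int) tv =>
        if tv.2 == -1 then (st.1 + 1, st.2)
        else (st.1 - 1, if st.1 ≥ k then max st.2 tv.1 else st.2)) (c, a)).2
      = pvSweep k c a L := by
  induction L generalizing c a with
  | nil => rfl
  | cons tv r ih =>
    by_cases h : tv.2 == -1
    · simp only [List.foldl_cons, h, if_true, pvSweep]; exact ih _ _
    · simp only [List.foldl_cons, h, Bool.false_eq_true, if_false, pvSweep]; exact ih _ _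

lemma pv_sweep_eq_foldl_max (k : Int) (L : List (Int × Int)) :
    ∀ c a : Int, pvSweep k c a L = (pvQual k c L).foldl max a := by
  induction L with
  | nil => intro c a; rfl
  | cons tv r ih =>
    intro c a
    by_cases h : tv.2 == -1
    · simp only [pvSweep, pvQual, h, if_true]; exact ih _ _
    · simp only [pvSweep, pvQual, h, Bool.false_eq_true, if_false]
      by_cases hk : c ≥ k
      · simp only [hk, if_true, List.singleton_append, List.foldl_cons]; exact ih _ _
      · simp only [hk, if_false, List.nil_append]; exact ih _ _

lemma pv_mem_qual (k e : Int) :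
    ∀ (L : List (Int × Int)) (c : Int), L.Pairwise pvLexLe →
      (∀ p ∈ L, p.2 = -1 ∨ p.2 = 1) →
      (e ∈ pvQual k c L ↔ (e, 1) ∈ L ∧ c + pvCov e L ≥ k) := by
  intro L
  induction L with
  | nil => intro c _ _; simp [pvQual, pvCov]
  | cons tv r ih =>
    rcases tv with ⟨t, ty⟩
    intro c hsort hty
    rcases List.pairwise_cons.1 hsort with ⟨hhead, hr⟩
    have htyr : ∀ p ∈ r, p.2 = -1 ∨ p.2 = 1 := fun p hp => hty p (List.mem_cons_of_mem _ hp)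
    rcases hty (t, ty) List.mem_cons_self with h1 | h1 <;> subst h1
    · -- start event
      have hq : pvQual k c ((t, (-1 : Int)) :: r) = pvQual k (c + 1) r := by simp [pvQual]
      have hmem : ((e, (1 : Int)) ∈ (t, (-1 : Int)) :: r) ↔ (e, (1 : Int)) ∈ r := by
        simp [Prod.ext_iff]
      have hcov : pvCov e ((t, (-1 : Int)) :: r) = pvCov e r + (if t ≤ e then 1 else 0) := by
        simp only [pvCov, List.countP_cons]
        by_cases hte : t ≤ e <;> simp [hte] <;> push_cast <;> ring
      rw [hq, ih (c + 1) hr htyr, hmem, hcov]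
      by_cases hm : (e, (1 : Int)) ∈ r
      · have hte : t ≤ e := by
          have h := hhead _ hm
          simp only [pvLexLe] at h; omega
        simp only [hm, true_and, if_pos hte]
        omega
      · simp [hm]
    · -- end event
      have hq : pvQual k c ((t, (1 : Int)) :: r)
          = (if c ≥ k then [t] else []) ++ pvQual k (c - 1) r := by simp [pvQual]
      have hcov : pvCov e ((t, (1 : Int)) :: r) = pvCov e r - (if t < e then 1 else 0) := by
        simp only [pvCov, List.countP_cons]
        by_cases hte : t < e <;> simp [hte] <;> push_cast <;> ring
      rw [hq]
      by_cases het : e = t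
      · subst het
        have hcovr : pvCov e r = 0 := by
          have hS : r.countP (fun p => p.2 == -1 && decide (p.1 ≤ e)) = 0 := by
            apply List.countP_eq_zero.2
            intro p hp
            have hlex := hhead p hp
            simp only [pvLexLe] at hlex
            rcases htyr p hp with h2 | h2 <;> simp [h2] <;> omega
          have hE : r.countP (fun p => (!(p.2 == -1)) && decide (p.1 < e)) = 0 := by
            apply List.countP_eq_zero.2
            intro p hp
            have hlex := hhead p hp
            simp only [pvLexLe] at hlex
            rcases htyr p hp with h2 | h2 <;> simp [h2] <;> omega
          simp [pvCov, hS, hE]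
        have hcovL : pvCov e ((e, (1 : Int)) :: r) = 0 := by rw [hcov, hcovr]; simp
        rw [hcovL]
        simp only [List.mem_append, ih (c - 1) hr htyr]
        constructor
        · rintro (hc | ⟨_, hk2⟩)
          · have hck : c ≥ k := by by_contra hck; simp [hck] at hc
            exact ⟨List.mem_cons_self, by omega⟩
          · exact ⟨List.mem_cons_self, by omega⟩
        · rintro ⟨_, hk2⟩
          left
          simp [show c ≥ k by omega]
      · have hmem : ((e, (1 : Int)) ∈ (t, (1 : Int)) :: r) ↔ (e, (1 : Int)) ∈ r := by
          simp [Prod.ext_iff, het]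
        have hnotin : e ∉ (if c ≥ k then [t] else []) := by
          split_ifs <;> simp [het]
        rw [hcov]
        simp only [List.mem_append, ih (c - 1) hr htyr, hmem]
        by_cases hm : (e, (1 : Int)) ∈ r
        · have hte : t < e := by
            have h := hhead _ hm
            simp only [pvLexLe] at h
            omega
          simp only [hm, true_and, if_pos hte]
          constructor
          · rintro (hc | hk2)
            · exact absurd hc hnotin
            · omega
          · intro hk2; right; omega
        · simp [hm, hnotin]

def pvEvs (intervals : List (List Int)) : List (Int × Int) :=
  intervals.flatMap (fun iv => [(PySem.List.pyGetD iv 0 0, (-1 : Int)), (PySem.List.pyGetD iv 1 0, (1 : Int))])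

def pvStarts (intervals : List (List Int)) : List Int :=
  intervals.map (fun iv => PySem.List.pyGetD iv 0 0)

def pvEnds (intervals : List (List Int)) : List Int :=
  intervals.map (fun iv => PySem.List.pyGetD iv 1 0)

lemma pv_mem_evs_end (e : Int) (ivs : List (List Int)) :
    ((e, (1 : Int)) ∈ pvEvs ivs) ↔ e ∈ pvEnds ivs := by
  simp [pvEvs, pvEnds, List.mem_flatMap, Prod.ext_iff, eq_comm]

lemma pv_ty_evs (ivs : List (List Int)) : ∀ p ∈ pvEvs ivs, p.2 = -1 ∨ p.2 = 1 := by
  intro p hp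
  simp only [pvEvs, List.mem_flatMap, List.mem_cons] at hp
  rcases hp with ⟨iv, _, rfl | rfl | h⟩
  · left; rfl
  · right; rfl
  · cases h

lemma pv_cov_evs (e : Int) (ivs : List (List Int)) :
    pvCov e (pvEvs ivs) =
      ((pvStarts ivs).countP (fun s => decide (s ≤ e)) : Int) -
      ((pvEnds ivs).countP (fun t => decide (t < e)) : Int) := by
  induction ivs with
  | nil => rfl
  | cons iv ivs ih =>
    simp only [pvEvs, pvCov, pvStarts, pvEnds, List.flatMap_cons, List.map_cons,
      List.countP_append, List.countP_cons] at ih ⊢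
    push_cast
    split_ifs <;> simp_all <;> omega

lemma pv_countP_of_bounds (xs : List Int) (p : Int → Bool) (i : Nat) (hi : i ≤ xs.length)
    (h1 : ∀ (j : Nat) (hj : j < xs.length), j < i → p xs[j] = true)
    (h2 : ∀ (j : Nat) (hj : j < xs.length), i ≤ j → p xs[j] = false) :
    xs.countP p = i := by
  have hsplit : xs = xs.take i ++ xs.drop i := (List.take_append_drop i xs).symm
  have htake : (xs.take i).countP p = (xs.take i).length := by
    apply List.countP_eq_length.2
    intro a ha
    rcases List.getElem_of_mem ha with ⟨j, hj, rfl⟩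
    have hji : j < i := by
      have := hj; simp [List.length_take] at this; omega
    have hjx : j < xs.length := by
      have := hj; simp [List.length_take] at this; omega
    rw [List.getElem_take]
    exact h1 j hjx hji
  have hdrop : (xs.drop i).countP p = 0 := by
    apply List.countP_eq_zero.2
    intro a ha
    rcases List.getElem_of_mem ha with ⟨j, hj, rfl⟩
    have hjx : i + j < xs.length := by
      have := hj; simp [List.length_drop] at this; omega
    rw [List.getElem_drop]
    simp [h2 (i + j) hjx (by omega)]
  calc xs.countP p = (xs.take i ++ xs.drop i).countP p := by rw [← hsplit]
    _ = (xs.take i).countP p + (xs.drop i).countP p := List.countP_append ..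
    _ = (xs.take i).length + 0 := by rw [htake, hdrop]
    _ = i := by simp [List.length_take]; omega

lemma pv_bisectRight_eq_countP (xs : List Int) (h : xs.Pairwise (· ≤ ·)) (e : Int) :
    PySem.List.bisectRight xs e = xs.countP (fun y => decide (y ≤ e)) := by
  obtain ⟨hle, hlt, hgt⟩ := PySem.List.bisectRight_spec xs e h
  exact (pv_countP_of_bounds xs _ _ hle
    (fun j hj hji => by simp [hlt j hj hji])
    (fun j hj hji => by simp [hgt j hj hji])).symm

lemma pv_bisectLeft_eq_countP (xs : List Int) (h : xs.Pairwise (· ≤ ·)) (e : Int) :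
    PySem.List.bisectLeft xs e = xs.countP (fun y => decide (y < e)) := by
  obtain ⟨hle, hlt, hgt⟩ := PySem.List.bisectLeft_spec xs e h
  exact (pv_countP_of_bounds xs _ _ hle
    (fun j hj hji => by simp [hlt j hj hji])
    (fun j hj hji => by simp [hgt j hj hji])).symm

lemma pv_foldl_max_eq_of_mem_iff (a : Int) (l1 l2 : List Int)
    (h : ∀ x, x ∈ l1 ↔ x ∈ l2) : l1.foldl max a = l2.foldl max a := by
  apply le_antisymm
  · rcases PySem.List.foldl_max_mem l1 a with h1 | h1
    · rw [h1]; exact (PySem.List.le_foldl_max l2 a).1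
    · exact (PySem.List.le_foldl_max l2 a).2 _ ((h _).1 h1)
  · rcases PySem.List.foldl_max_mem l2 a with h2 | h2
    · rw [h2]; exact (PySem.List.le_foldl_max l1 a).1
    · exact (PySem.List.le_foldl_max l1 a).2 _ ((h _).2 h2)

lemma pv_main (n : Int) (ivs : List (List Int)) (k : Int) :
    powerfullInteger n ivs k = powerfullInteger_alt n ivs k := by
  have hevs : ivs.foldl
      (fun acc iv => acc ++ [(PySem.List.pyGetD iv 0 0, (-1 : Int)), (PySem.List.pyGetD iv 1 0, (1 : Int))]) []
      = pvEvs ivs := by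
    rw [PySem.List.foldl_append_eq_flatMap]; rfl
  have hperm : (PySem.List.sorted2 (pvEvs ivs) (fun p => p.1) (fun p => p.2)).Perm (pvEvs ivs) :=
    PySem.List.sorted2_perm _ _ _ _
  have hA : powerfullInteger n ivs k
      = (pvQual k 0 (PySem.List.sorted2 (pvEvs ivs) (fun p => p.1) (fun p => p.2))).foldl max (-1) := by
    simp only [powerfullInteger]
    rw [hevs, pv_foldl_eq_sweep, pv_sweep_eq_foldl_max]
  have hpermS : (PySem.List.sorted (pvStarts ivs) (fun x => x)).Perm (pvStarts ivs) :=
    PySem.List.sorted_perm _ _ _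
  have hpermE : (PySem.List.sorted (pvEnds ivs) (fun x => x)).Perm (pvEnds ivs) :=
    PySem.List.sorted_perm _ _ _
  have hB : powerfullInteger_alt n ivs k
      = ((PySem.List.sorted (pvEnds ivs) (fun x => x)).filter
          (fun e => decide (((PySem.List.bisectRight (PySem.List.sorted (pvStarts ivs) (fun x => x)) e : Int)
            - (PySem.List.bisectLeft (PySem.List.sorted (pvEnds ivs) (fun x => x)) e : Int)) ≥ k))).foldl max (-1) := by
    simp only [powerfullInteger_alt, pvStarts, pvEnds]
    rw [PySem.List.foldl_ite_eq_foldl_filter]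
    rfl
  rw [hA, hB]
  apply pv_foldl_max_eq_of_mem_iff
  intro x
  have hsort : (PySem.List.sorted2 (pvEvs ivs) (fun p => p.1) (fun p => p.2)).Pairwise pvLexLe :=
    pv_sorted2_pairwise _
  have hty : ∀ p ∈ PySem.List.sorted2 (pvEvs ivs) (fun p => p.1) (fun p => p.2), p.2 = -1 ∨ p.2 = 1 :=
    fun p hp => pv_ty_evs ivs p (hperm.mem_iff.1 hp)
  rw [pv_mem_qual k x _ 0 hsort hty]
  have hcovL : pvCov x (PySem.List.sorted2 (pvEvs ivs) (fun p => p.1) (fun p => p.2)) = pvCov x (pvEvs ivs) := by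
    simp only [pvCov, hperm.countP_eq]
  have hbr : (PySem.List.bisectRight (PySem.List.sorted (pvStarts ivs) (fun x => x)) x : Int)
      = ((pvStarts ivs).countP (fun y => decide (y ≤ x)) : Int) := by
    rw [pv_bisectRight_eq_countP _ (PySem.List.sorted_pairwise _ _) x, hpermS.countP_eq]
  have hbl : (PySem.List.bisectLeft (PySem.List.sorted (pvEnds ivs) (fun x => x)) x : Int)
      = ((pvEnds ivs).countP (fun y => decide (y < x)) : Int) := by
    rw [pv_bisectLeft_eq_countP _ (PySem.List.sorted_pairwise _ _) x, hpermE.countP_eq]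
  rw [List.mem_filter, decide_eq_true_iff, hbr, hbl, PySem.List.mem_sorted,
    hperm.mem_iff, pv_mem_evs_end, hcovL, pv_cov_evs]
  constructor
  · rintro ⟨hm, hk2⟩; exact ⟨hm, by omega⟩
  · rintro ⟨hm, hk2⟩; exact ⟨hm, by omega⟩

-- ===== VERDICT (by name: the statement is the Claim_ definition above) =====
theorem powerfullInteger_spec : Claim_equal_powerfullInteger := by
  intro n intervals k _ _
  show powerfullInteger n intervals k = powerfullInteger_alt n intervals k
  exact pv_main n intervals k
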